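-- pv_equiv track=rewrite | github.com/Nenavathnaresh/Python_DSA | Graphs/Medium/neemans-shoes.py | exercise
-- ===== SOURCE A (Python) =====
-- import heapq
--
-- def exercise(N, M, A, src, dest, X):
--     # Create adjacency list for the graph
--     adj = [[] for _ in range(N)]
--
--     for i in range(M):
--         u, v, w = A[i]
--         adj[u].append((v, w))
--         adj[v].append((u, w))
--
--     # Dijkstra's algorithm to find the shortest path from src to dest
--     def dijkstra(src, dest):
--         dist = [float('inf')] * N
--         dist[src] = 0
--         min_heap = [(0, src)]  # (distance, node)
--
--         while min_heap:
--             current_dist, u = heapq.heappop(min_heap)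
--
--             if current_dist > dist[u]:
--                 continue
--
--             for v, weight in adj[u]:
--                 if dist[u] + weight < dist[v]:
--                     dist[v] = dist[u] + weight
--                     heapq.heappush(min_heap, (dist[v], v))
--
--         return dist[dest]
--
--     # Find the shortest path from src to dest
--     shortest_path = dijkstra(src, dest)
--
--     # Compare the shortest path distance with X
--     if shortest_path > X:
--         return "Neeman's Wool Joggers"
--     else:
--         return "Neeman's Cotton Classics"
-- ===== SOURCE B (Python) =====
-- def exercise(N, M, A, src, dest, X):
--     # Bellman-Ford with early termination: sweep all M undirected edges,
--     # relaxing both directions, until a full pass changes nothing.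
--     INF = float('inf')
--     dist = [INF] * N
--     dist[src] = 0
--     changed = True
--     while changed:
--         changed = False
--         for i in range(M):
--             u, v, w = A[i]
--             if dist[u] + w < dist[v]:
--                 dist[v] = dist[u] + w
--                 changed = True
--             if dist[v] + w < dist[u]:
--                 dist[u] = dist[v] + w
--                 changed = True
--     if dist[dest] > X:
--         return "Neeman's Wool Joggers"
--     else:
--         return "Neeman's Cotton Classics"
-- ===== Notes on version B (the rewrite author's own statement) =====
-- stated objective: alternative
-- what changed: Replaced heap-based Dijkstra over a built adjacency list by Bellman-Ford with early termination: repeated relaxation sweeps over the raw edge list (both directions) until a full pass changes nothing, no heap and no adjacency structure.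
import Mathlib
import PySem

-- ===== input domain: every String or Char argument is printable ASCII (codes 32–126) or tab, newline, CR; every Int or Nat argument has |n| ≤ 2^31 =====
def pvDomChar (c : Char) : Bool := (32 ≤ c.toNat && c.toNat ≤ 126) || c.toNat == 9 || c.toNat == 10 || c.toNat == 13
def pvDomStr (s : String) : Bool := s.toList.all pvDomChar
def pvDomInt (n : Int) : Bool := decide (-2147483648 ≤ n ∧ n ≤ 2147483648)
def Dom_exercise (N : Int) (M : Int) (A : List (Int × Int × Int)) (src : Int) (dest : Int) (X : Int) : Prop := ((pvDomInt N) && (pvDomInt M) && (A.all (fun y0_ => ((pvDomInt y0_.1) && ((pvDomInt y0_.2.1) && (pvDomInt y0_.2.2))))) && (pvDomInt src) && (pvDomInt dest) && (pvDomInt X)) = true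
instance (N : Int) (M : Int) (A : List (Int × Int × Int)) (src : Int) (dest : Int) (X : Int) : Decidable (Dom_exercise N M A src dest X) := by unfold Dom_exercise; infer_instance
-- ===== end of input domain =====

-- ===== PORT A =====
-- B replaces heap-based Dijkstra (adjacency list + lazy-deletion heap) by early-terminating
-- Bellman-Ford sweeps over the raw edge list; equal final answer proved on Pre_ (valid indices,
-- nonnegative weights). Shared helpers below model Python's float('inf') arithmetic (none = inf)
-- and the in-place list update `dist[v] = dist[u] + w`; the extra conjuncts of `relaxE`'s guard
-- (index in range, nonnegative new value) only make the recursion total — on Pre_ they hold.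

-- Python's  dist[u] + w  where dist[u] may be float('inf')  (none = inf)
def infAdd : Option Int → Int → Option Int
  | none, _ => none
  | some a, w => some (a + w)

-- Python's  x < y  on int-or-inf values
def infLt : Option Int → Option Int → Bool
  | some a, some b => decide (a < b)
  | some _, none => true
  | none, _ => false

-- dist[i] (read; out of range only outside Pre_, where it yields inf)
def dGet (dist : List (Option Int)) (i : Int) : Option Int :=
  PySem.List.pyGetD dist i none

-- dist[i] = x (write; no-op out of range, which Pre_ excludes)
def dSet (dist : List (Option Int)) (i : Int) (x : Option Int) : List (Option Int) :=
  PySem.List.pySetD dist i x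

-- termination measure pieces: number of inf slots, and the sum of the finite (nonnegative) values
def noneCnt (l : List (Option Int)) : Nat := l.countP (fun x => x.isNone)
def finSum (l : List (Option Int)) : Nat := (l.map (fun x => (x.getD 0).toNat)).sum
-- strict lexicographic decrease of (noneCnt, finSum)
def mLt (a b : List (Option Int)) : Prop :=
  noneCnt a < noneCnt b ∨ (noneCnt a = noneCnt b ∧ finSum a < finSum b)

-- `if dist[u] + w < dist[v]: dist[v] = dist[u] + w` (cand = dist[u] + w); returns the written
-- value when the branch fired. The last two conjuncts are totality guards, vacuous under Pre_.
def relaxE (dist : List (Option Int)) (v : Int) (cand : Option Int) :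
    List (Option Int) × Option Int :=
  match cand with
  | none => (dist, none)
  | some c =>
    if infLt (some c) (dGet dist v) = true ∧ PySem.Raise.InRange dist.length v ∧
       (dGet dist v = none ∨ 0 ≤ c)
    then (dSet dist v (some c), some c) else (dist, none)

-- the Nat slot a Python index i addresses in a list of length n (meaningful when InRange n i)
def nIdx (n : Nat) (i : Int) : Nat := if 0 ≤ i then i.toNat else n - (-i).toNat

lemma pyIdx?_inRange {n : Nat} {i : Int} (h : PySem.Raise.InRange n i) :
    PySem.List.pyIdx? n i = some (nIdx n i) ∧ nIdx n i < n := by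
  obtain ⟨h1, h2⟩ := h
  simp only [PySem.List.pyIdx?, nIdx]
  split_ifs with h0 <;> simp <;> omega

lemma dSet_eq_set {d : List (Option Int)} {v : Int} {x : Option Int}
    (h : PySem.Raise.InRange d.length v) : dSet d v x = d.set (nIdx d.length v) x := by
  simp [dSet, PySem.List.pySetD, PySem.List.pySet?, (pyIdx?_inRange h).1]

lemma dGet_eq_getElem {d : List (Option Int)} {i : Int} (h : PySem.Raise.InRange d.length i) :
    dGet d i = d[nIdx d.length i]'((pyIdx?_inRange h).2) := by
  simp [dGet, PySem.List.pyGetD, PySem.List.pyGet?, (pyIdx?_inRange h).1,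
    List.getElem?_eq_getElem ((pyIdx?_inRange h).2)]

lemma relaxE_some_eq (dist : List (Option Int)) (v : Int) (c : Int) :
    relaxE dist v (some c) =
      if infLt (some c) (dGet dist v) = true ∧ PySem.Raise.InRange dist.length v ∧
         (dGet dist v = none ∨ 0 ≤ c)
      then (dSet dist v (some c), some c) else (dist, none) := rfl

lemma relaxE_none {dist : List (Option Int)} {v : Int} {cand : Option Int}
    (h : (relaxE dist v cand).2 = none) : (relaxE dist v cand).1 = dist := by
  rcases cand with _ | c
  · rfl
  · rw [relaxE_some_eq]
    split_ifs with hc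
    · rw [relaxE_some_eq, if_pos hc] at h
      exact absurd h (by simp)
    · rfl

lemma mLt_of_set {d : List (Option Int)} {j : Nat} (hj : j < d.length) {c : Int}
    (hlt : infLt (some c) d[j] = true) (hg : d[j] = none ∨ 0 ≤ c) :
    mLt (d.set j (some c)) d := by
  rcases hget : d[j] with _ | o
  · left
    unfold noneCnt
    rw [List.countP_set hj]
    have hpos : 0 < d.countP (fun x => x.isNone) :=
      List.countP_pos_iff.2 ⟨d[j], List.getElem_mem hj, by simp [hget]⟩
    rw [hget]
    norm_num at hpos ⊢
    omega
  · right
    have hc : c < o := by simpa [hget, infLt] using hlt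
    have hc0 : 0 ≤ c := by
      rcases hg with h | h
      · rw [hget] at h; simp at h
      · exact h
    constructor
    · unfold noneCnt
      rw [List.countP_set hj]
      simp [hget]
    · unfold finSum
      rw [List.map_set]
      have hjm : j < (d.map (fun x => (x.getD 0).toNat)).length := by simpa using hj
      rw [List.sum_set]
      conv_rhs => rw [show d.map (fun x => (x.getD 0).toNat)
        = (d.map (fun x => (x.getD 0).toNat)).set j ((d.map (fun x => (x.getD 0).toNat))[j])
          from (List.set_getElem_self ..).symm]
      rw [List.sum_set]
      have hv : (d.map (fun x => (x.getD 0).toNat))[j] = o.toNat := by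
        simp [hget]
      simp only [hjm, if_pos, hv, Option.getD_some]
      have : c.toNat < o.toNat := by omega
      omega

lemma relaxE_mLt {dist : List (Option Int)} {v : Int} {cand : Option Int} {c : Int}
    (h : (relaxE dist v cand).2 = some c) : mLt (relaxE dist v cand).1 dist := by
  rcases cand with _ | c'
  · simp [relaxE] at h
  · rw [relaxE_some_eq] at h ⊢
    split_ifs at h ⊢ with hc
    · obtain ⟨h1, h2, h3⟩ := hc
      rw [dSet_eq_set h2]
      have hg := dGet_eq_getElem h2
      refine mLt_of_set (pyIdx?_inRange h2).2 (by rw [← hg]; exact h1) ?_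
      rw [← hg]
      exact h3

-- heapq.heappop: remove and return the smallest (distance, node) tuple
def popMin : List (Int × Int) → Option ((Int × Int) × List (Int × Int))
  | [] => none
  | x :: xs =>
    match popMin xs with
    | none => some (x, [])
    | some (m, rest) =>
      if x.1 < m.1 ∨ (x.1 = m.1 ∧ x.2 ≤ m.2) then some (x, xs) else some (m, x :: rest)

lemma popMin_none_iff {h : List (Int × Int)} : popMin h = none ↔ h = [] := by
  cases h with
  | nil => simp [popMin]
  | cons x xs =>
    simp only [popMin]
    rcases hp : popMin xs with _ | p
    · simp
    · obtain ⟨m0, rest0⟩ := p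
      simp only []
      split_ifs <;> simp

lemma popMin_perm {h : List (Int × Int)} {m : Int × Int} {rest : List (Int × Int)}
    (hp : popMin h = some (m, rest)) : h.Perm (m :: rest) := by
  induction h generalizing m rest with
  | nil => simp [popMin] at hp
  | cons x xs ih =>
    simp only [popMin] at hp
    rcases hq : popMin xs with _ | q
    · rw [hq] at hp
      simp only [Option.some.injEq, Prod.mk.injEq] at hp
      rw [popMin_none_iff.1 hq]
      rw [← hp.1, ← hp.2]
    · obtain ⟨m0, rest0⟩ := q
      rw [hq] at hp
      simp only [] at hp
      split_ifs at hp with hcmp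
      · simp only [Option.some.injEq, Prod.mk.injEq] at hp
        rw [← hp.1, ← hp.2]
      · simp only [Option.some.injEq, Prod.mk.injEq] at hp
        obtain ⟨h1, h2⟩ := hp
        subst h1
        subst h2
        exact ((ih hq).cons x).trans (List.Perm.swap ..)

-- the inner edge loop of Dijkstra: relax every (v, w) in adj[u], collecting the heap pushes
def relaxList (u : Int) : List (Int × Int) → List (Option Int) → List (Int × Int) →
    List (Option Int) × List (Int × Int)
  | [], dist, pushes => (dist, pushes)
  | (v, w) :: rest, dist, pushes =>
    let r := relaxE dist v (infAdd (dGet dist u) w)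
    relaxList u rest r.1 (match r.2 with | some c => pushes ++ [(c, v)] | none => pushes)

lemma mLt_trans {a b c : List (Option Int)} (h1 : mLt a b) (h2 : mLt b c) : mLt a c := by
  unfold mLt at *; omega

lemma relaxList_cases (u : Int) :
    ∀ (l : List (Int × Int)) (dist : List (Option Int)) (pushes : List (Int × Int)),
    ((relaxList u l dist pushes).1 = dist ∧ (relaxList u l dist pushes).2 = pushes) ∨
      mLt (relaxList u l dist pushes).1 dist := by
  intro l
  induction l with
  | nil => intro dist pushes; exact Or.inl ⟨rfl, rfl⟩
  | cons vw rest ih =>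
    intro dist pushes
    obtain ⟨v, w⟩ := vw
    simp only [relaxList]
    rcases hr : (relaxE dist v (infAdd (dGet dist u) w)).2 with _ | c <;> dsimp only
    · have he := relaxE_none hr
      rcases ih (relaxE dist v (infAdd (dGet dist u) w)).1 pushes with h | h
      · exact Or.inl ⟨by rw [h.1, he], h.2⟩
      · right
        rw [he] at h
        rwa [he]
    · have he := relaxE_mLt hr
      rcases ih (relaxE dist v (infAdd (dGet dist u) w)).1 (pushes ++ [(c, v)]) with h | h
      · exact Or.inr (by rw [h.1]; exact he)
      · exact Or.inr (mLt_trans h he)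

lemma lex3_1 {a1 a2 b1 b2 c1 c2 : Nat} (h : a1 < a2) :
    Prod.Lex (· < ·) (Prod.Lex (· < ·) (· < ·)) (a1, b1, c1) (a2, b2, c2) :=
  Prod.Lex.left _ _ h

lemma lex3_2 {a1 a2 b1 b2 c1 c2 : Nat} (ha : a1 = a2) (h : b1 < b2) :
    Prod.Lex (· < ·) (Prod.Lex (· < ·) (· < ·)) (a1, b1, c1) (a2, b2, c2) :=
  ha ▸ Prod.Lex.right _ (Prod.Lex.left _ _ h)

lemma lex3_3 {a1 a2 b1 b2 c1 c2 : Nat} (ha : a1 = a2) (hb : b1 = b2) (h : c1 < c2) :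
    Prod.Lex (· < ·) (Prod.Lex (· < ·) (· < ·)) (a1, b1, c1) (a2, b2, c2) :=
  ha ▸ hb ▸ Prod.Lex.right _ (Prod.Lex.right _ h)

-- the `while min_heap:` loop of A (lazy-deletion Dijkstra); totality via the
-- (noneCnt, finSum, |heap|) lexicographic measure
def dloop (adj : List (List (Int × Int))) (heap : List (Int × Int))
    (dist : List (Option Int)) : List (Option Int) :=
  match hp : popMin heap with
  | none => dist
  | some ((c, u), rest) =>
    if infLt (dGet dist u) (some c) = true then dloop adj rest dist
    else
      let s := relaxList u (PySem.List.pyGetD adj u []) dist []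
      dloop adj (rest ++ s.2) s.1
termination_by (noneCnt dist, finSum dist, heap.length)
decreasing_by
  · have := (popMin_perm hp).length_eq
    simp at this
    exact lex3_3 rfl rfl (by omega)
  · rcases relaxList_cases u (PySem.List.pyGetD adj u []) dist [] with h | h
    · have := (popMin_perm hp).length_eq
      simp at this
      exact lex3_3 (by rw [h.1]) (by rw [h.1]) (by rw [h.2]; simp; omega)
    · rcases h with h | h
      · exact lex3_1 h
      · exact lex3_2 h.1 h.2

-- adj[u].append((v, w)); adj[v].append((u, w))  for one edge e = (u, v, w)
def adjAppend (adj : List (List (Int × Int))) (e : Int × Int × Int) : List (List (Int × Int)) :=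
  let adj1 := PySem.List.pySetD adj e.1 (PySem.List.pyGetD adj e.1 [] ++ [(e.2.1, e.2.2)])
  PySem.List.pySetD adj1 e.2.1 (PySem.List.pyGetD adj1 e.2.1 [] ++ [(e.1, e.2.2)])

def exercise (N : Int) (M : Int) (A : List (Int × Int × Int)) (src : Int) (dest : Int) (X : Int) : String :=
  -- adj = [[] for _ in range(N)]; for i in range(M): u,v,w = A[i]; adj[u].append((v,w)); adj[v].append((u,w))
  let adj0 : List (List (Int × Int)) := List.replicate N.toNat []
  let adj := (PySem.List.pyRange 0 M 1).foldl
    (fun adj i => adjAppend adj (PySem.List.pyGetD A i (0, 0, 0))) adj0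
  -- dist = [inf]*N; dist[src] = 0; min_heap = [(0, src)]; dijkstra loop
  let dist0 := dSet (List.replicate N.toNat (none : Option Int)) src (some 0)
  let distF := dloop adj [(0, src)] dist0
  -- if shortest_path > X: Joggers else Cotton
  if infLt (some X) (dGet distF dest) = true then "Neeman's Wool Joggers"
  else "Neeman's Cotton Classics"

-- ===== PORT B =====
-- one Bellman-Ford pass: for i in range(M): u,v,w = A[i]; relax u->v then v->u, tracking `changed`
def bpass (A : List (Int × Int × Int)) (M : Int) (dist : List (Option Int)) :
    List (Option Int) × Bool :=
  (PySem.List.pyRange 0 M 1).foldl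
    (fun s i =>
      let e := PySem.List.pyGetD A i (0, 0, 0)
      let r1 := relaxE s.1 e.2.1 (infAdd (dGet s.1 e.1) e.2.2)
      let c1 := s.2 || r1.2.isSome
      let r2 := relaxE r1.1 e.1 (infAdd (dGet r1.1 e.2.1) e.2.2)
      (r2.1, c1 || r2.2.isSome)) (dist, false)

lemma relaxE_flag (dist : List (Option Int)) (v : Int) (cand : Option Int) :
    ((relaxE dist v cand).1 = dist ∧ (relaxE dist v cand).2.isSome = false) ∨
      (mLt (relaxE dist v cand).1 dist ∧ (relaxE dist v cand).2.isSome = true) := by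
  rcases h : (relaxE dist v cand).2 with _ | c
  · exact Or.inl ⟨relaxE_none h, rfl⟩
  · exact Or.inr ⟨relaxE_mLt h, rfl⟩

lemma bstep_cases (A : List (Int × Int × Int)) (s : List (Option Int) × Bool) (i : Int) :
    (((fun s i =>
      let e := PySem.List.pyGetD A i (0, 0, 0)
      let r1 := relaxE s.1 e.2.1 (infAdd (dGet s.1 e.1) e.2.2)
      let c1 := s.2 || r1.2.isSome
      let r2 := relaxE r1.1 e.1 (infAdd (dGet r1.1 e.2.1) e.2.2)
      (r2.1, c1 || r2.2.isSome)) s i : List (Option Int) × Bool).1 = s.1 ∧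
      ((fun s i =>
      let e := PySem.List.pyGetD A i (0, 0, 0)
      let r1 := relaxE s.1 e.2.1 (infAdd (dGet s.1 e.1) e.2.2)
      let c1 := s.2 || r1.2.isSome
      let r2 := relaxE r1.1 e.1 (infAdd (dGet r1.1 e.2.1) e.2.2)
      (r2.1, c1 || r2.2.isSome)) s i : List (Option Int) × Bool).2 = s.2) ∨
    (mLt ((fun s i =>
      let e := PySem.List.pyGetD A i (0, 0, 0)
      let r1 := relaxE s.1 e.2.1 (infAdd (dGet s.1 e.1) e.2.2)
      let c1 := s.2 || r1.2.isSome
      let r2 := relaxE r1.1 e.1 (infAdd (dGet r1.1 e.2.1) e.2.2)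
      (r2.1, c1 || r2.2.isSome)) s i : List (Option Int) × Bool).1 s.1 ∧
      ((fun s i =>
      let e := PySem.List.pyGetD A i (0, 0, 0)
      let r1 := relaxE s.1 e.2.1 (infAdd (dGet s.1 e.1) e.2.2)
      let c1 := s.2 || r1.2.isSome
      let r2 := relaxE r1.1 e.1 (infAdd (dGet r1.1 e.2.1) e.2.2)
      (r2.1, c1 || r2.2.isSome)) s i : List (Option Int) × Bool).2 = true) := by
  dsimp only
  rcases relaxE_flag s.1 (PySem.List.pyGetD A i (0, 0, 0)).2.1
      (infAdd (dGet s.1 (PySem.List.pyGetD A i (0, 0, 0)).1)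
        (PySem.List.pyGetD A i (0, 0, 0)).2.2) with ⟨a1, b1⟩ | ⟨a1, b1⟩ <;>
    rcases relaxE_flag (relaxE s.1 (PySem.List.pyGetD A i (0, 0, 0)).2.1
        (infAdd (dGet s.1 (PySem.List.pyGetD A i (0, 0, 0)).1)
          (PySem.List.pyGetD A i (0, 0, 0)).2.2)).1 (PySem.List.pyGetD A i (0, 0, 0)).1
      (infAdd (dGet (relaxE s.1 (PySem.List.pyGetD A i (0, 0, 0)).2.1
          (infAdd (dGet s.1 (PySem.List.pyGetD A i (0, 0, 0)).1)
            (PySem.List.pyGetD A i (0, 0, 0)).2.2)).1 (PySem.List.pyGetD A i (0, 0, 0)).2.1)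
        (PySem.List.pyGetD A i (0, 0, 0)).2.2) with ⟨a2, b2⟩ | ⟨a2, b2⟩
  · exact Or.inl ⟨a2.trans a1, by rw [b1, b2]; simp⟩
  · refine Or.inr ⟨?_, by rw [b2]; simp⟩
    rw [a1] at a2
    rw [a1]
    exact a2
  · exact Or.inr ⟨by rw [a2]; exact a1, by rw [b1]; simp⟩
  · exact Or.inr ⟨mLt_trans a2 a1, by rw [b1]; simp⟩

lemma bfold_cases (A : List (Int × Int × Int)) :
    ∀ (l : List Int) (s : List (Option Int) × Bool),
    ((l.foldl (fun s i =>
      let e := PySem.List.pyGetD A i (0, 0, 0)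
      let r1 := relaxE s.1 e.2.1 (infAdd (dGet s.1 e.1) e.2.2)
      let c1 := s.2 || r1.2.isSome
      let r2 := relaxE r1.1 e.1 (infAdd (dGet r1.1 e.2.1) e.2.2)
      (r2.1, c1 || r2.2.isSome)) s).1 = s.1 ∧
     (l.foldl (fun s i =>
      let e := PySem.List.pyGetD A i (0, 0, 0)
      let r1 := relaxE s.1 e.2.1 (infAdd (dGet s.1 e.1) e.2.2)
      let c1 := s.2 || r1.2.isSome
      let r2 := relaxE r1.1 e.1 (infAdd (dGet r1.1 e.2.1) e.2.2)
      (r2.1, c1 || r2.2.isSome)) s).2 = s.2) ∨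
    (mLt (l.foldl (fun s i =>
      let e := PySem.List.pyGetD A i (0, 0, 0)
      let r1 := relaxE s.1 e.2.1 (infAdd (dGet s.1 e.1) e.2.2)
      let c1 := s.2 || r1.2.isSome
      let r2 := relaxE r1.1 e.1 (infAdd (dGet r1.1 e.2.1) e.2.2)
      (r2.1, c1 || r2.2.isSome)) s).1 s.1 ∧
     (l.foldl (fun s i =>
      let e := PySem.List.pyGetD A i (0, 0, 0)
      let r1 := relaxE s.1 e.2.1 (infAdd (dGet s.1 e.1) e.2.2)
      let c1 := s.2 || r1.2.isSome
      let r2 := relaxE r1.1 e.1 (infAdd (dGet r1.1 e.2.1) e.2.2)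
      (r2.1, c1 || r2.2.isSome)) s).2 = true) := by
  intro l
  induction l with
  | nil => intro s; exact Or.inl ⟨rfl, rfl⟩
  | cons i rest ih =>
    intro s
    rw [List.foldl_cons]
    rcases bstep_cases A s i with hs | hs <;>
      rcases ih ((fun s i =>
        let e := PySem.List.pyGetD A i (0, 0, 0)
        let r1 := relaxE s.1 e.2.1 (infAdd (dGet s.1 e.1) e.2.2)
        let c1 := s.2 || r1.2.isSome
        let r2 := relaxE r1.1 e.1 (infAdd (dGet r1.1 e.2.1) e.2.2)
        (r2.1, c1 || r2.2.isSome)) s i) with hr | hr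
    · exact Or.inl ⟨hr.1.trans hs.1, hr.2.trans hs.2⟩
    · exact Or.inr ⟨by rw [hs.1] at hr; exact hr.1, hr.2⟩
    · exact Or.inr ⟨by rw [hr.1]; exact hs.1, hr.2.trans hs.2⟩
    · exact Or.inr ⟨mLt_trans hr.1 hs.1, hr.2⟩

lemma bpass_progress {A : List (Int × Int × Int)} {M : Int} {dist : List (Option Int)}
    (h : (bpass A M dist).2 = true) : mLt (bpass A M dist).1 dist := by
  unfold bpass at *
  rcases bfold_cases A (PySem.List.pyRange 0 M 1) (dist, false) with hs | hs
  · rw [hs.2] at h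
    simp at h
  · exact hs.1

-- `while changed:` — repeat passes until a pass changes nothing
def bloop (A : List (Int × Int × Int)) (M : Int) (dist : List (Option Int)) :
    List (Option Int) :=
  let s := bpass A M dist
  if hs : s.2 = true then bloop A M s.1 else s.1
termination_by (noneCnt dist, finSum dist)
decreasing_by
  rcases bpass_progress hs with h | h
  · exact Prod.Lex.left _ _ h
  · exact h.1 ▸ Prod.Lex.right _ h.2

def exercise_alt (N : Int) (M : Int) (A : List (Int × Int × Int)) (src : Int) (dest : Int) (X : Int) : String :=
  let dist0 := dSet (List.replicate N.toNat (none : Option Int)) src (some 0)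
  let distF := bloop A M dist0
  if infLt (some X) (dGet distF dest) = true then "Neeman's Wool Joggers"
  else "Neeman's Cotton Classics"

-- ===== PRECONDITION & SPEC =====
-- Pre_ keeps the task's natural domain: src/dest and the first M edges' endpoints are valid
-- Python indices of a length-N list (A raises IndexError otherwise), M does not exceed len(A)
-- (A raises IndexError otherwise), and the first M edge weights are nonnegative: with a negative
-- weight the undirected edge is a negative cycle, on which Dijkstra's answer is unspecified and
-- both programs may loop forever (a negative edge unreachable from src leaves both answers equal
-- but is excluded with the rest of the negative-weight inputs).
def Pre_exercise (N : Int) (M : Int) (A : List (Int × Int × Int)) (src : Int) (dest : Int) (X : Int) : Prop :=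
  M ≤ (A.length : Int) ∧ PySem.Raise.InRange N.toNat src ∧ PySem.Raise.InRange N.toNat dest ∧
    ∀ e ∈ A.take M.toNat, PySem.Raise.InRange N.toNat e.1 ∧ PySem.Raise.InRange N.toNat e.2.1 ∧ 0 ≤ e.2.2
instance (N : Int) (M : Int) (A : List (Int × Int × Int)) (src : Int) (dest : Int) (X : Int) : Decidable (Pre_exercise N M A src dest X) := by unfold Pre_exercise; infer_instance

def pvWitness_exercise : Int × Int × (List (Int × Int × Int)) × Int × Int × Int :=
  (3, 2, [(0, 1, 4), (1, 2, 1)], 0, 2, 5)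

def Spec_exercise (N : Int) (M : Int) (A : List (Int × Int × Int)) (src : Int) (dest : Int) (X : Int) (out : String) : Prop := out = exercise_alt N M A src dest X
instance (N : Int) (M : Int) (A : List (Int × Int × Int)) (src : Int) (dest : Int) (X : Int) (out : String) : Decidable (Spec_exercise N M A src dest X out) := by unfold Spec_exercise; infer_instance

-- ===== CLAIM (what is proved, stated in full; the proofs are below) =====
def Claim_equal_exercise : Prop := ∀ (N : Int) (M : Int) (A : List (Int × Int × Int)) (src : Int) (dest : Int) (X : Int), Dom_exercise N M A src dest X → Pre_exercise N M A src dest X → Spec_exercise N M A src dest X (exercise N M A src dest X)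


-- ===== LEMMAS AND PROOFS =====

-- ---- order facts about int-or-inf values ----

-- a ≤ b on int-or-inf values
abbrev iLe (a b : Option Int) : Prop := infLt b a = false

lemma iLe_refl (a : Option Int) : iLe a a := by
  rcases a with _ | a <;> simp [iLe, infLt]

lemma iLe_trans {a b c : Option Int} (h1 : iLe a b) (h2 : iLe b c) : iLe a c := by
  rcases a with _ | a <;> rcases b with _ | b <;> rcases c with _ | c <;>
    simp [iLe, infLt] at * <;> omega

lemma iLe_antisymm {a b : Option Int} (h1 : iLe a b) (h2 : iLe b a) : a = b := by
  rcases a with _ | a <;> rcases b with _ | b <;> simp [iLe, infLt] at * <;> omega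

lemma iLe_of_infLt {a b : Option Int} (h : infLt a b = true) : iLe a b := by
  rcases a with _ | a <;> rcases b with _ | b <;> simp [iLe, infLt] at * <;> omega

lemma infAdd_mono {a b : Option Int} (w : Int) (h : iLe a b) :
    iLe (infAdd a w) (infAdd b w) := by
  rcases a with _ | a <;> rcases b with _ | b <;> simp [iLe, infLt, infAdd] at * <;> omega

lemma iLe_of_not_infLt {a b : Option Int} (h : ¬ infLt a b = true) : iLe b a := by
  simpa [iLe] using h

-- ---- generic wraparound index/update facts (any element type) ----

lemma pyIdx?_out {n : Nat} {i : Int} (h : ¬ PySem.Raise.InRange n i) :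
    PySem.List.pyIdx? n i = none := by
  simp only [PySem.Raise.InRange, not_and_or, not_le, not_lt] at h
  simp only [PySem.List.pyIdx?]
  split_ifs <;> first | rfl | omega

lemma dGet_out {d : List (Option Int)} {i : Int} (h : ¬ PySem.Raise.InRange d.length i) :
    dGet d i = none := by
  simp [dGet, PySem.List.pyGetD, PySem.List.pyGet?, pyIdx?_out h]


lemma gSet_out {γ : Type} {l : List γ} {v : Int} {x : γ}
    (h : ¬ PySem.Raise.InRange l.length v) : PySem.List.pySetD l v x = l := by
  simp [PySem.List.pySetD, PySem.List.pySet?, pyIdx?_out h]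

lemma gSet_eq {γ : Type} {l : List γ} {v : Int} {x : γ}
    (h : PySem.Raise.InRange l.length v) :
    PySem.List.pySetD l v x = l.set (nIdx l.length v) x := by
  simp [PySem.List.pySetD, PySem.List.pySet?, (pyIdx?_inRange h).1]

lemma gGet_eq {γ : Type} {l : List γ} {dflt : γ} {i : Int}
    (h : PySem.Raise.InRange l.length i) :
    PySem.List.pyGetD l i dflt = l[nIdx l.length i]'((pyIdx?_inRange h).2) := by
  simp [PySem.List.pyGetD, PySem.List.pyGet?, (pyIdx?_inRange h).1,
    List.getElem?_eq_getElem ((pyIdx?_inRange h).2)]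

lemma gGet_out {γ : Type} {l : List γ} {dflt : γ} {i : Int}
    (h : ¬ PySem.Raise.InRange l.length i) : PySem.List.pyGetD l i dflt = dflt := by
  simp [PySem.List.pyGetD, PySem.List.pyGet?, pyIdx?_out h]

lemma gSet_length {γ : Type} (l : List γ) (v : Int) (x : γ) :
    (PySem.List.pySetD l v x).length = l.length := by
  by_cases h : PySem.Raise.InRange l.length v
  · rw [gSet_eq h, List.length_set]
  · rw [gSet_out h]

-- two Python indices addressing the same slot of any length-n list
abbrev alias2 (n : Nat) (i j : Int) : Prop :=
  PySem.Raise.InRange n i ∧ PySem.Raise.InRange n j ∧ nIdx n i = nIdx n j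

lemma alias2_refl {n : Nat} {i : Int} (h : PySem.Raise.InRange n i) : alias2 n i i :=
  ⟨h, h, rfl⟩

lemma alias2_symm {n : Nat} {i j : Int} (h : alias2 n i j) : alias2 n j i :=
  ⟨h.2.1, h.1, h.2.2.symm⟩

lemma alias2_trans {n : Nat} {i j k : Int} (h1 : alias2 n i j) (h2 : alias2 n j k) :
    alias2 n i k := ⟨h1.1, h2.2.1, h1.2.2.trans h2.2.2⟩

lemma gGet_alias {γ : Type} {l : List γ} {dflt : γ} {i j : Int}
    (h : alias2 l.length i j) : PySem.List.pyGetD l i dflt = PySem.List.pyGetD l j dflt := by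
  rw [gGet_eq h.1, gGet_eq h.2.1]
  congr 1
  exact h.2.2

-- effect of a wraparound write on every wraparound read
lemma gGet_eq? {γ : Type} {l : List γ} {dflt : γ} {i : Int}
    (h : PySem.Raise.InRange l.length i) :
    PySem.List.pyGetD l i dflt = (l[nIdx l.length i]?).getD dflt := by
  simp [PySem.List.pyGetD, PySem.List.pyGet?, (pyIdx?_inRange h).1]

lemma gGet_gSet {γ : Type} {l : List γ} {dflt : γ} {v : Int} {x : γ}
    (hv : PySem.Raise.InRange l.length v) (i : Int) :
    PySem.List.pyGetD (PySem.List.pySetD l v x) i dflt =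
      if alias2 l.length i v then x else PySem.List.pyGetD l i dflt := by
  rw [gSet_eq hv]
  by_cases hi : PySem.Raise.InRange l.length i
  · rw [gGet_eq? (l := l.set (nIdx l.length v) x) (by rw [List.length_set]; exact hi)]
    simp only [List.length_set]
    rw [List.getElem?_set]
    by_cases ha : nIdx l.length i = nIdx l.length v
    · rw [if_pos ha.symm, if_pos (pyIdx?_inRange hv).2, if_pos ⟨hi, hv, ha⟩]
      rfl
    · rw [if_neg (fun hc => ha hc.symm), if_neg (fun hc => ha hc.2.2), ← gGet_eq? hi]
  · rw [if_neg (fun hc => hi hc.1)]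
    rw [gGet_out (by rw [List.length_set]; exact hi), gGet_out hi]

-- dGet/dSet corollaries (element type Option Int, default none = inf)
lemma dGet_dSet {d : List (Option Int)} {v : Int} {x : Option Int}
    (hv : PySem.Raise.InRange d.length v) (i : Int) :
    dGet (dSet d v x) i = if alias2 d.length i v then x else dGet d i :=
  gGet_gSet hv i

lemma dGet_alias {d : List (Option Int)} {i j : Int} (h : alias2 d.length i j) :
    dGet d i = dGet d j := gGet_alias h

lemma dSet_length (d : List (Option Int)) (v : Int) (x : Option Int) :
    (dSet d v x).length = d.length := gSet_length ..

lemma dGet_replicate {n : Nat} {i : Int} : dGet (List.replicate n (none : Option Int)) i = none := by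
  by_cases h : PySem.Raise.InRange (List.replicate n (none : Option Int)).length i
  · rw [dGet_eq_getElem h]
    exact List.getElem_replicate ..
  · exact dGet_out h

-- ---- graph-side notions shared by the two correctness arguments ----

-- edges have valid endpoints and nonnegative weight (the content of Pre_ for the first M edges)
def EdgeOK (n : Nat) (E : List (Int × Int × Int)) : Prop :=
  ∀ e ∈ E, PySem.Raise.InRange n e.1 ∧ PySem.Raise.InRange n e.2.1 ∧ 0 ≤ e.2.2

-- dist satisfies the relaxation fixpoint inequalities on every edge, both directions
def SatE (E : List (Int × Int × Int)) (d : List (Option Int)) : Prop :=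
  ∀ e ∈ E, infLt (infAdd (dGet d e.1) e.2.2) (dGet d e.2.1) = false ∧
    infLt (infAdd (dGet d e.2.1) e.2.2) (dGet d e.1) = false

-- pointwise order on distance tables, read through Python indexing
def dLe (a b : List (Option Int)) : Prop := ∀ i : Int, iLe (dGet a i) (dGet b i)

lemma dLe_refl (d : List (Option Int)) : dLe d d := fun i => iLe_refl _

lemma dLe_trans {a b c : List (Option Int)} (h1 : dLe a b) (h2 : dLe b c) : dLe a c :=
  fun i => iLe_trans (h1 i) (h2 i)

-- all finite entries are nonnegative
def NonNeg (d : List (Option Int)) : Prop := ∀ (i : Int) (a : Int), dGet d i = some a → 0 ≤ a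

-- (v, w) is recorded in adj[u]
def PairIn (adj : List (List (Int × Int))) (u : Int) (p : Int × Int) : Prop :=
  p ∈ PySem.List.pyGetD adj u []

-- heap entries name valid slots and over-approximate the current distance
def HeapInv (n : Nat) (d : List (Option Int)) (heap : List (Int × Int)) : Prop :=
  ∀ p ∈ heap, PySem.Raise.InRange n p.2 ∧ iLe (dGet d p.2) (some p.1)

-- every adjacency pair is either already relaxed or covered by a live heap entry
def I1 (n : Nat) (adj : List (List (Int × Int))) (heap : List (Int × Int))
    (d : List (Option Int)) : Prop :=
  ∀ u p, PairIn adj u p →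
    infLt (infAdd (dGet d u) p.2) (dGet d p.1) = false ∨
      ∃ c x, (c, x) ∈ heap ∧ alias2 n u x ∧ dGet d x = some c

-- the built adjacency structure represents exactly the undirected edge list E
def AdjInv (n : Nat) (E : List (Int × Int × Int)) (adj : List (List (Int × Int))) : Prop :=
  adj.length = n ∧
  (∀ u p, PairIn adj u p → ∃ e ∈ E, e.2.2 = p.2 ∧
      ((alias2 n u e.1 ∧ p.1 = e.2.1) ∨ (alias2 n u e.2.1 ∧ p.1 = e.1))) ∧
  (∀ e ∈ E, PairIn adj e.1 (e.2.1, e.2.2) ∧ PairIn adj e.2.1 (e.1, e.2.2))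

lemma relaxE_some_spec {dist : List (Option Int)} {v : Int} {cand : Option Int} {c : Int}
    (h : (relaxE dist v cand).2 = some c) :
    cand = some c ∧ infLt (some c) (dGet dist v) = true ∧
      PySem.Raise.InRange dist.length v ∧ (relaxE dist v cand).1 = dSet dist v (some c) := by
  rcases cand with _ | c'
  · simp [relaxE] at h
  · rw [relaxE_some_eq] at h ⊢
    split_ifs at h ⊢ with hif
    · simp only [Option.some.injEq] at h
      subst h
      exact ⟨rfl, hif.1, hif.2.1, rfl⟩

-- relaxE leaves dist unchanged only when the Python condition is false (under the Pre_ facts)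
lemma relaxE_none_not_lt {dist : List (Option Int)} {v : Int} {cand : Option Int}
    (hv : PySem.Raise.InRange dist.length v) (hc : ∀ c, cand = some c → 0 ≤ c)
    (h : (relaxE dist v cand).2 = none) : infLt cand (dGet dist v) = false := by
  rcases cand with _ | c
  · rfl
  · rw [relaxE_some_eq] at h
    split_ifs at h with hif
    rcases Bool.eq_false_or_eq_true (infLt (some c) (dGet dist v)) with hf | ht
    · exact absurd ⟨hf, hv, Or.inr (hc c rfl)⟩ hif
    · exact ht

-- ---- the one-step relaxation lemma both programs share ----

lemma relax_step {n : Nat} {dist : List (Option Int)} {u v w : Int}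
    (hl : dist.length = n) (hnn : NonNeg dist)
    (hv : PySem.Raise.InRange n v) (hw : 0 ≤ w) :
    let r := relaxE dist v (infAdd (dGet dist u) w)
    r.1.length = n ∧ NonNeg r.1 ∧ dLe r.1 dist ∧
    (∀ g, g.length = n → iLe (dGet g v) (infAdd (dGet g u) w) → dLe g dist → dLe g r.1) ∧
    (∀ c, r.2 = some c → infAdd (dGet dist u) w = some c ∧
        infLt (some c) (dGet dist v) = true ∧ dGet r.1 v = some c ∧ 0 ≤ c) ∧
    (r.2 = none → r.1 = dist ∧ infLt (infAdd (dGet dist u) w) (dGet dist v) = false) ∧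
    iLe (dGet r.1 v) (infAdd (dGet dist u) w) ∧
    (∀ i : Int, dGet r.1 i = dGet dist i ∨
        (alias2 n i v ∧ ∃ c, r.2 = some c ∧ dGet r.1 i = some c)) := by
  intro r
  have hvl : PySem.Raise.InRange dist.length v := by rw [hl]; exact hv
  have hcnn : ∀ c, infAdd (dGet dist u) w = some c → 0 ≤ c := by
    intro c hcand
    rcases hdu : dGet dist u with _ | a
    · rw [hdu] at hcand; simp [infAdd] at hcand
    · rw [hdu] at hcand
      simp only [infAdd, Option.some.injEq] at hcand
      have := hnn u a hdu
      omega
  rcases hr : r.2 with _ | c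
  · have he : r.1 = dist := relaxE_none hr
    have hnl : infLt (infAdd (dGet dist u) w) (dGet dist v) = false :=
      relaxE_none_not_lt hvl hcnn hr
    rw [he]
    refine ⟨hl, hnn, dLe_refl dist, fun g _ _ hg => hg, ?_, fun _ => ⟨rfl, hnl⟩, hnl,
      fun i => Or.inl rfl⟩
    intro c hc
    exact absurd hc (by simp)
  · obtain ⟨hcand, hlt, _, hfst⟩ := relaxE_some_spec hr
    have hc0 : 0 ≤ c := hcnn c hcand
    have hspec : ∀ i : Int, dGet r.1 i = if alias2 n i v then some c else dGet dist i := by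
      intro i
      rw [hfst]
      have := dGet_dSet (d := dist) (v := v) (x := some c) hvl i
      rwa [hl] at this
    have hrv : dGet r.1 v = some c := by
      rw [hspec v, if_pos (alias2_refl hv)]
    refine ⟨?_, ?_, ?_, ?_, ?_, ?_, ?_, ?_⟩
    · rw [hfst, dSet_length, hl]
    · intro i a ha
      rw [hspec i] at ha
      split_ifs at ha with hal
      · cases ha; exact hc0
      · exact hnn i a ha
    · intro i
      rw [hspec i]
      split_ifs with hal
      · have : dGet dist i = dGet dist v := dGet_alias (by rw [hl]; exact hal)
        rw [this]
        exact iLe_of_infLt hlt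
      · exact iLe_refl _
    · intro g hgl hgsat hglow i
      rw [hspec i]
      split_ifs with hal
      · have : dGet g i = dGet g v := dGet_alias (by rw [hgl]; exact hal)
        rw [this, ← hcand]
        exact iLe_trans hgsat (infAdd_mono w (hglow u))
      · exact hglow i
    · intro c' hc'
      cases hc'
      exact ⟨hcand, hlt, hrv, hc0⟩
    · intro hn
      exact absurd hn (by simp)
    · rw [hrv, ← hcand]
      exact iLe_refl _
    · intro i
      rw [hspec i]
      split_ifs with hal
      · exact Or.inr ⟨hal, c, rfl, rfl⟩
      · exact Or.inl rfl

-- ---- A-side: the inner relaxation loop ----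

lemma relaxList_post {n : Nat} {E : List (Int × Int × Int)} {adj : List (List (Int × Int))}
    (hadj : AdjInv n E adj) (hE : EdgeOK n E) (x : Int) (c : Int) (hc : 0 ≤ c) :
    ∀ (l : List (Int × Int)) (dist : List (Option Int)) (pushes : List (Int × Int)),
    dist.length = n → NonNeg dist →
    (∀ p ∈ l, PairIn adj x p) → dGet dist x = some c →
    (∀ p ∈ pushes, PySem.Raise.InRange n p.2 ∧ iLe (dGet dist p.2) (some p.1)) →
    (relaxList x l dist pushes).1.length = n ∧ NonNeg (relaxList x l dist pushes).1 ∧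
    dLe (relaxList x l dist pushes).1 dist ∧
    (∀ g, g.length = n → SatE E g → dLe g dist → dLe g (relaxList x l dist pushes).1) ∧
    dGet (relaxList x l dist pushes).1 x = some c ∧
    (∀ p ∈ (relaxList x l dist pushes).2,
        PySem.Raise.InRange n p.2 ∧ iLe (dGet (relaxList x l dist pushes).1 p.2) (some p.1)) ∧
    (∀ p ∈ pushes, p ∈ (relaxList x l dist pushes).2) ∧
    (∀ p ∈ l, infLt (infAdd (dGet (relaxList x l dist pushes).1 x) p.2)
        (dGet (relaxList x l dist pushes).1 p.1) = false) ∧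
    (∀ i : Int, dGet (relaxList x l dist pushes).1 i = dGet dist i ∨
        ∃ c' x', (c', x') ∈ (relaxList x l dist pushes).2 ∧ alias2 n i x' ∧
          dGet (relaxList x l dist pushes).1 x' = some c') := by
  intro l
  induction l with
  | nil =>
    intro dist pushes hl hnn _ hx hpush
    exact ⟨hl, hnn, dLe_refl dist, fun g _ _ hg => hg, hx, hpush, fun p hp => hp,
      fun p hp => absurd hp (List.not_mem_nil), fun i => Or.inl rfl⟩
  | cons vw rest ih =>
    intro dist pushes hl hnn hpairs hx hpush
    obtain ⟨v, w⟩ := vw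
    -- the pair comes from a real edge of E
    have hpin : PairIn adj x (v, w) := hpairs (v, w) (List.mem_cons_self ..)
    obtain ⟨e, heE, hwE, hcase⟩ := hadj.2.1 x (v, w) hpin
    obtain ⟨he1, he2, he3⟩ := hE e heE
    have hv : PySem.Raise.InRange n v := by
      rcases hcase with ⟨_, hva⟩ | ⟨_, hva⟩
      · rw [show v = e.2.1 from hva]; exact he2
      · rw [show v = e.1 from hva]; exact he1
    have hw : 0 ≤ w := by rw [show w = e.2.2 from hwE.symm]; exact he3
    have hgsat : ∀ g : List (Option Int), g.length = n → SatE E g →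
        iLe (dGet g v) (infAdd (dGet g x) w) := by
      intro g hgl hgS
      rcases hcase with ⟨hal, hva⟩ | ⟨hal, hva⟩
      · have hs := (hgS e heE).1
        have hgx : dGet g x = dGet g e.1 := dGet_alias (by rw [hgl]; exact hal)
        rw [show v = e.2.1 from hva, hgx, show w = e.2.2 from hwE.symm]
        exact hs
      · have hs := (hgS e heE).2
        have hgx : dGet g x = dGet g e.2.1 := dGet_alias (by rw [hgl]; exact hal)
        rw [show v = e.1 from hva, hgx, show w = e.2.2 from hwE.symm]
        exact hs
    obtain ⟨R1, R2, R3, R4, R5, R6, R7, R8⟩ :=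
      relax_step (n := n) (u := x) (v := v) (w := w) hl hnn hv hw
    simp only [relaxList]
    -- current dist[x] is still c after this relaxation (no negative self-loop)
    have hx' : dGet (relaxE dist v (infAdd (dGet dist x) w)).1 x = some c := by
      rcases R8 x with h8 | ⟨hal, c'', hr2, hget⟩
      · rw [h8]; exact hx
      · exfalso
        obtain ⟨hcand, hlt, _, _⟩ := R5 c'' hr2
        have hdv : dGet dist v = dGet dist x := dGet_alias (by rw [hl]; exact alias2_symm hal)
        rw [hx] at hcand
        simp only [infAdd, Option.some.injEq] at hcand
        rw [hdv, hx, ← hcand] at hlt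
        simp [infLt] at hlt
        omega
    rcases hr : (relaxE dist v (infAdd (dGet dist x) w)).2 with _ | cNew
    all_goals dsimp only
    -- no update: recurse with the unchanged dist and pushes
    · have hfst := relaxE_none hr
      rw [hfst]
      obtain ⟨S1, S2, S3, S4, S5, S6, S7, S8, S9⟩ := ih dist pushes hl hnn
        (fun p hp => hpairs p (List.mem_cons_of_mem _ hp)) hx hpush
      refine ⟨S1, S2, S3, S4, S5, S6, S7, ?_, S9⟩
      intro p hp
      rcases List.mem_cons.1 hp with rfl | hp'
      · have h6 : iLe (dGet dist v) (infAdd (dGet dist x) w) := (R6 hr).2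
        have hch : iLe (dGet (relaxList x rest dist pushes).1 v)
            (infAdd (dGet dist x) w) := iLe_trans (S3 v) h6
        show infLt (infAdd (dGet (relaxList x rest dist pushes).1 x) w)
            (dGet (relaxList x rest dist pushes).1 v) = false
        rw [S5, ← hx]
        exact hch
      · exact S8 p hp'
    -- update: recurse with the new push appended
    · have hR5 := R5 cNew hr
      have hrec := ih (relaxE dist v (infAdd (dGet dist x) w)).1 (pushes ++ [(cNew, v)])
        R1 R2 (fun p hp => hpairs p (List.mem_cons_of_mem _ hp)) hx' ?hpush'
      case hpush' =>
        intro p hp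
        rcases List.mem_append.1 hp with hp' | hp'
        · exact ⟨(hpush p hp').1, iLe_trans (R3 p.2) (hpush p hp').2⟩
        · rw [List.mem_singleton] at hp'
          subst hp'
          exact ⟨hv, by rw [hR5.2.2.1]; exact iLe_refl _⟩
      obtain ⟨S1, S2, S3, S4, S5, S6, S7, S8, S9⟩ := hrec
      refine ⟨S1, S2, dLe_trans S3 R3, ?_, S5, S6, ?_, ?_, ?_⟩
      · intro g hgl hgS hglow
        exact S4 g hgl hgS (R4 g hgl (hgsat g hgl hgS) hglow)
      · intro p hp
        exact S7 p (List.mem_append_left _ hp)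
      · intro p hp
        rcases List.mem_cons.1 hp with rfl | hp'
        · have hch : iLe (dGet (relaxList x rest (relaxE dist v (infAdd (dGet dist x) w)).1
              (pushes ++ [(cNew, v)])).1 v) (infAdd (dGet dist x) w) :=
            iLe_trans (S3 v) R7
          show infLt (infAdd (dGet (relaxList x rest (relaxE dist v (infAdd (dGet dist x) w)).1
              (pushes ++ [(cNew, v)])).1 x) w)
            (dGet (relaxList x rest (relaxE dist v (infAdd (dGet dist x) w)).1
              (pushes ++ [(cNew, v)])).1 v) = false
          rw [S5, ← hx]
          exact hch
        · exact S8 p hp'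
      · intro i
        rcases S9 i with h9 | ⟨c', x', hmem, hal, hget⟩
        · rcases R8 i with h8 | ⟨hal, c'', hr2, hget⟩
          · exact Or.inl (h9.trans h8)
          · have hr2' : cNew = c'' := by
              rw [hr] at hr2
              exact Option.some.inj hr2
            subst hr2'
            refine Or.inr ⟨cNew, v, S7 (cNew, v)
              (List.mem_append_right _ (List.mem_singleton.2 rfl)), hal, ?_⟩
            have heq : dGet (relaxList x rest (relaxE dist v (infAdd (dGet dist x) w)).1
                  (pushes ++ [(cNew, v)])).1 v =
                dGet (relaxList x rest (relaxE dist v (infAdd (dGet dist x) w)).1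
                  (pushes ++ [(cNew, v)])).1 i := dGet_alias (by rw [S1]; exact alias2_symm hal)
            rw [heq, h9, hget]
        · exact Or.inr ⟨c', x', hmem, hal, hget⟩

-- ---- A-side: the heap loop ----

lemma dloop_post {n : Nat} {E : List (Int × Int × Int)} {adj : List (List (Int × Int))}
    (hadj : AdjInv n E adj) (hE : EdgeOK n E) :
    ∀ (heap : List (Int × Int)) (dist : List (Option Int)),
    dist.length = n → NonNeg dist → HeapInv n dist heap → I1 n adj heap dist →
    (dloop adj heap dist).length = n ∧ NonNeg (dloop adj heap dist) ∧
    dLe (dloop adj heap dist) dist ∧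
    SatE E (dloop adj heap dist) ∧
    (∀ g, g.length = n → SatE E g → dLe g dist → dLe g (dloop adj heap dist)) := by
  intro heap dist
  fun_induction dloop adj heap dist with
  | case1 heap dist hp =>
    intro h1 h2 h3 h4
    refine ⟨h1, h2, dLe_refl dist, ?_, fun g _ _ hg => hg⟩
    intro e heE
    obtain ⟨hp1, hp2⟩ := hadj.2.2 e heE
    have hs1 := h4 e.1 (e.2.1, e.2.2) hp1
    have hs2 := h4 e.2.1 (e.1, e.2.2) hp2
    rcases hs1 with hs1 | ⟨c, x, hm, _, _⟩
    · rcases hs2 with hs2 | ⟨c, x, hm, _, _⟩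
      · exact ⟨hs1, hs2⟩
      · rw [popMin_none_iff.1 hp] at hm
        exact absurd hm (List.not_mem_nil)
    · rw [popMin_none_iff.1 hp] at hm
      exact absurd hm (List.not_mem_nil)
  | case2 heap dist c u rest hp hskip ih =>
    intro h1 h2 h3 h4
    have hperm := popMin_perm hp
    refine ih h1 h2 ?_ ?_
    · intro p hpm
      exact h3 p (hperm.mem_iff.2 (List.mem_cons_of_mem _ hpm))
    · intro u' p hpin
      rcases h4 u' p hpin with hsat | ⟨c'', x'', hmem, halx, hgetx⟩
      · exact Or.inl hsat
      · refine Or.inr ⟨c'', x'', ?_, halx, hgetx⟩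
        rcases List.mem_cons.1 (hperm.mem_iff.1 hmem) with heq | hmem'
        · exfalso
          have : dGet dist u = some c := by
            rw [show x'' = u from congrArg Prod.snd heq] at hgetx
            rw [hgetx, show c'' = c from congrArg Prod.fst heq]
          rw [this] at hskip
          simp [infLt] at hskip
        · exact hmem'
  | case3 heap dist c u rest hp hproc s ih =>
    intro h1 h2 h3 h4
    have hperm := popMin_perm hp
    have hcu : (c, u) ∈ heap := hperm.mem_iff.2 (List.mem_cons_self ..)
    obtain ⟨hu, hule⟩ := h3 (c, u) hcu
    have hxc : dGet dist u = some c := iLe_antisymm hule (iLe_of_not_infLt hproc)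
    have hc0 : 0 ≤ c := h2 u c hxc
    obtain ⟨S1, S2, S3, S4, S5, S6, S7, S8, S9⟩ :=
      relaxList_post hadj hE u c hc0 (PySem.List.pyGetD adj u []) dist []
        h1 h2 (fun p hp' => hp') hxc (fun p hp' => absurd hp' (List.not_mem_nil))
    have hHeap : HeapInv n (relaxList u (PySem.List.pyGetD adj u []) dist []).1
        (rest ++ (relaxList u (PySem.List.pyGetD adj u []) dist []).2) := by
      intro p hpm
      rcases List.mem_append.1 hpm with hpm | hpm
      · have := h3 p (hperm.mem_iff.2 (List.mem_cons_of_mem _ hpm))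
        exact ⟨this.1, iLe_trans (S3 p.2) this.2⟩
      · exact S6 p hpm
    have hI1 : I1 n adj (rest ++ (relaxList u (PySem.List.pyGetD adj u []) dist []).2)
        (relaxList u (PySem.List.pyGetD adj u []) dist []).1 := by
      intro u' p hpin
      by_cases halu : alias2 n u' u
      · left
        have hslot : PySem.List.pyGetD adj u' ([] : List (Int × Int)) =
            PySem.List.pyGetD adj u [] := gGet_alias (by rw [hadj.1]; exact halu)
        have hpin' : p ∈ PySem.List.pyGetD adj u ([] : List (Int × Int)) := by
          rw [← hslot]; exact hpin
        have hs := S8 p hpin'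
        have heq : dGet (relaxList u (PySem.List.pyGetD adj u []) dist []).1 u' =
            dGet (relaxList u (PySem.List.pyGetD adj u []) dist []).1 u :=
          dGet_alias (by rw [S1]; exact halu)
        rw [heq]
        exact hs
      · rcases h4 u' p hpin with hsat | ⟨c'', x'', hmem, halx, hgetx⟩
        · rcases S9 u' with h9 | ⟨c', x', hm', hal', hget'⟩
          · left
            show iLe (dGet (relaxList u (PySem.List.pyGetD adj u []) dist []).1 p.1)
              (infAdd (dGet (relaxList u (PySem.List.pyGetD adj u []) dist []).1 u') p.2)
            rw [h9]
            exact iLe_trans (S3 p.1) hsat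
          · exact Or.inr ⟨c', x', List.mem_append_right _ hm', hal', hget'⟩
        · by_cases heqw : (c'', x'') = (c, u)
          · exfalso
            rw [show x'' = u from congrArg Prod.snd heqw] at halx
            exact halu halx
          · have hmem' : (c'', x'') ∈ rest := by
              rcases List.mem_cons.1 (hperm.mem_iff.1 hmem) with heq | hmem'
              · exact absurd heq heqw
              · exact hmem'
            rcases S9 x'' with h9 | ⟨c', x', hm', hal', hget'⟩
            · refine Or.inr ⟨c'', x'', List.mem_append_left _ hmem', halx, ?_⟩
              rw [h9]
              exact hgetx
            · exact Or.inr ⟨c', x', List.mem_append_right _ hm', alias2_trans halx hal', hget'⟩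
    obtain ⟨T1, T2, T3, T4, T5⟩ := ih S1 S2 hHeap hI1
    refine ⟨T1, T2, dLe_trans T3 S3, T4, ?_⟩
    intro g hgl hgS hglow
    exact T5 g hgl hgS (S4 g hgl hgS hglow)

set_option maxHeartbeats 1000000 in
lemma bfold_post {n : Nat} {E : List (Int × Int × Int)} {A : List (Int × Int × Int)}
    (hE : EdgeOK n E) :
    ∀ (l : List Int) (s : List (Option Int) × Bool),
    s.1.length = n → NonNeg s.1 →
    (∀ i ∈ l, PySem.List.pyGetD A i (0, 0, 0) ∈ E) →
    let t := l.foldl (fun s i =>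
      let e := PySem.List.pyGetD A i (0, 0, 0)
      let r1 := relaxE s.1 e.2.1 (infAdd (dGet s.1 e.1) e.2.2)
      let c1 := s.2 || r1.2.isSome
      let r2 := relaxE r1.1 e.1 (infAdd (dGet r1.1 e.2.1) e.2.2)
      (r2.1, c1 || r2.2.isSome)) s
    t.1.length = n ∧ NonNeg t.1 ∧ dLe t.1 s.1 ∧
    (∀ g, g.length = n → SatE E g → dLe g s.1 → dLe g t.1) ∧
    (s.2 = true → t.2 = true) := by
  intro l
  induction l with
  | nil =>
    intro s h1 h2 _
    exact ⟨h1, h2, dLe_refl _, fun g _ _ hg => hg, fun h => h⟩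
  | cons i rest ih =>
    intro s h1 h2 hl
    rw [List.foldl_cons]
    dsimp only
    have heE := hl i (List.mem_cons_self ..)
    obtain ⟨he1, he2, he3⟩ := hE _ heE
    obtain ⟨R1, R2, R3, R4, R5, R6, R7, R8⟩ :=
      relax_step (n := n) (u := (PySem.List.pyGetD A i (0, 0, 0)).1)
        (v := (PySem.List.pyGetD A i (0, 0, 0)).2.1)
        (w := (PySem.List.pyGetD A i (0, 0, 0)).2.2) h1 h2 he2 he3
    obtain ⟨Q1, Q2, Q3, Q4, Q5, Q6, Q7, Q8⟩ :=
      relax_step (n := n) (u := (PySem.List.pyGetD A i (0, 0, 0)).2.1)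
        (v := (PySem.List.pyGetD A i (0, 0, 0)).1)
        (w := (PySem.List.pyGetD A i (0, 0, 0)).2.2) R1 R2 he1 he3
    obtain ⟨T1, T2, T3, T4, T5⟩ := ih
      ((relaxE (relaxE s.1 (PySem.List.pyGetD A i (0, 0, 0)).2.1
          (infAdd (dGet s.1 (PySem.List.pyGetD A i (0, 0, 0)).1)
            (PySem.List.pyGetD A i (0, 0, 0)).2.2)).1 (PySem.List.pyGetD A i (0, 0, 0)).1
        (infAdd (dGet (relaxE s.1 (PySem.List.pyGetD A i (0, 0, 0)).2.1
            (infAdd (dGet s.1 (PySem.List.pyGetD A i (0, 0, 0)).1)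
              (PySem.List.pyGetD A i (0, 0, 0)).2.2)).1 (PySem.List.pyGetD A i (0, 0, 0)).2.1)
          (PySem.List.pyGetD A i (0, 0, 0)).2.2)).1,
       s.2 || (relaxE s.1 (PySem.List.pyGetD A i (0, 0, 0)).2.1
          (infAdd (dGet s.1 (PySem.List.pyGetD A i (0, 0, 0)).1)
            (PySem.List.pyGetD A i (0, 0, 0)).2.2)).2.isSome ||
        (relaxE (relaxE s.1 (PySem.List.pyGetD A i (0, 0, 0)).2.1
            (infAdd (dGet s.1 (PySem.List.pyGetD A i (0, 0, 0)).1)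
              (PySem.List.pyGetD A i (0, 0, 0)).2.2)).1 (PySem.List.pyGetD A i (0, 0, 0)).1
          (infAdd (dGet (relaxE s.1 (PySem.List.pyGetD A i (0, 0, 0)).2.1
              (infAdd (dGet s.1 (PySem.List.pyGetD A i (0, 0, 0)).1)
                (PySem.List.pyGetD A i (0, 0, 0)).2.2)).1 (PySem.List.pyGetD A i (0, 0, 0)).2.1)
            (PySem.List.pyGetD A i (0, 0, 0)).2.2)).2.isSome)
      Q1 Q2 (fun j hj => hl j (List.mem_cons_of_mem _ hj))
    refine ⟨T1, T2, dLe_trans T3 (dLe_trans Q3 R3), ?_, ?_⟩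
    · intro g hgl hgS hglow
      exact T4 g hgl hgS (Q4 g hgl ((hgS _ heE).2) (R4 g hgl ((hgS _ heE).1) hglow))
    · intro hs2
      apply T5
      rw [hs2]
      simp

set_option maxHeartbeats 1000000 in
lemma bfold_fix {n : Nat} {E : List (Int × Int × Int)} {A : List (Int × Int × Int)}
    (hE : EdgeOK n E) :
    ∀ (l : List Int) (s : List (Option Int) × Bool),
    s.1.length = n → NonNeg s.1 →
    (∀ i ∈ l, PySem.List.pyGetD A i (0, 0, 0) ∈ E) →
    (l.foldl (fun s i =>
      let e := PySem.List.pyGetD A i (0, 0, 0)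
      let r1 := relaxE s.1 e.2.1 (infAdd (dGet s.1 e.1) e.2.2)
      let c1 := s.2 || r1.2.isSome
      let r2 := relaxE r1.1 e.1 (infAdd (dGet r1.1 e.2.1) e.2.2)
      (r2.1, c1 || r2.2.isSome)) s).2 = false →
    (l.foldl (fun s i =>
      let e := PySem.List.pyGetD A i (0, 0, 0)
      let r1 := relaxE s.1 e.2.1 (infAdd (dGet s.1 e.1) e.2.2)
      let c1 := s.2 || r1.2.isSome
      let r2 := relaxE r1.1 e.1 (infAdd (dGet r1.1 e.2.1) e.2.2)
      (r2.1, c1 || r2.2.isSome)) s).1 = s.1 ∧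
    ∀ i ∈ l,
      infLt (infAdd (dGet s.1 (PySem.List.pyGetD A i (0, 0, 0)).1)
          (PySem.List.pyGetD A i (0, 0, 0)).2.2)
        (dGet s.1 (PySem.List.pyGetD A i (0, 0, 0)).2.1) = false ∧
      infLt (infAdd (dGet s.1 (PySem.List.pyGetD A i (0, 0, 0)).2.1)
          (PySem.List.pyGetD A i (0, 0, 0)).2.2)
        (dGet s.1 (PySem.List.pyGetD A i (0, 0, 0)).1) = false := by
  intro l
  induction l with
  | nil =>
    intro s _ _ _ _
    exact ⟨rfl, fun j hj => absurd hj (List.not_mem_nil)⟩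
  | cons i rest ih =>
    intro s h1 h2 hl hfix
    rw [List.foldl_cons] at hfix ⊢
    dsimp only at hfix ⊢
    have heE := hl i (List.mem_cons_self ..)
    obtain ⟨he1, he2, he3⟩ := hE _ heE
    -- the step's flag must already be false
    have hflag : (s.2 ||
        (relaxE s.1 (PySem.List.pyGetD A i (0, 0, 0)).2.1
          (infAdd (dGet s.1 (PySem.List.pyGetD A i (0, 0, 0)).1)
            (PySem.List.pyGetD A i (0, 0, 0)).2.2)).2.isSome ||
        (relaxE (relaxE s.1 (PySem.List.pyGetD A i (0, 0, 0)).2.1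
            (infAdd (dGet s.1 (PySem.List.pyGetD A i (0, 0, 0)).1)
              (PySem.List.pyGetD A i (0, 0, 0)).2.2)).1 (PySem.List.pyGetD A i (0, 0, 0)).1
          (infAdd (dGet (relaxE s.1 (PySem.List.pyGetD A i (0, 0, 0)).2.1
              (infAdd (dGet s.1 (PySem.List.pyGetD A i (0, 0, 0)).1)
                (PySem.List.pyGetD A i (0, 0, 0)).2.2)).1
              (PySem.List.pyGetD A i (0, 0, 0)).2.1)
            (PySem.List.pyGetD A i (0, 0, 0)).2.2)).2.isSome) = false := by
      rcases bfold_cases A rest _ with hc | hc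
      · rw [hc.2] at hfix
        exact hfix
      · rw [hc.2] at hfix
        exact absurd hfix (by simp)
    simp only [Bool.or_eq_false_iff] at hflag
    obtain ⟨⟨hs2, hr1⟩, hr2⟩ := hflag
    rw [Option.isSome_eq_false_iff, Option.isNone_iff_eq_none] at hr1 hr2
    have e1 := relaxE_none hr1
    have e2 := relaxE_none hr2
    have hnl1 : infLt (infAdd (dGet s.1 (PySem.List.pyGetD A i (0, 0, 0)).1)
        (PySem.List.pyGetD A i (0, 0, 0)).2.2)
        (dGet s.1 (PySem.List.pyGetD A i (0, 0, 0)).2.1) = false := by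
      apply relaxE_none_not_lt (by rw [h1]; exact he2) ?_ hr1
      intro cc hcc
      rcases hdu : dGet s.1 (PySem.List.pyGetD A i (0, 0, 0)).1 with _ | a
      · rw [hdu] at hcc; simp [infAdd] at hcc
      · rw [hdu] at hcc
        simp only [infAdd, Option.some.injEq] at hcc
        have := h2 _ a hdu
        omega
    have hnl2 : infLt (infAdd (dGet s.1 (PySem.List.pyGetD A i (0, 0, 0)).2.1)
        (PySem.List.pyGetD A i (0, 0, 0)).2.2)
        (dGet s.1 (PySem.List.pyGetD A i (0, 0, 0)).1) = false := by
      have := relaxE_none_not_lt (dist := (relaxE s.1 (PySem.List.pyGetD A i (0, 0, 0)).2.1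
          (infAdd (dGet s.1 (PySem.List.pyGetD A i (0, 0, 0)).1)
            (PySem.List.pyGetD A i (0, 0, 0)).2.2)).1)
        (by rw [e1, h1]; exact he1) ?_ hr2
      · rw [e1] at this
        exact this
      · intro cc hcc
        rw [e1] at hcc
        rcases hdu : dGet s.1 (PySem.List.pyGetD A i (0, 0, 0)).2.1 with _ | a
        · rw [hdu] at hcc; simp [infAdd] at hcc
        · rw [hdu] at hcc
          simp only [infAdd, Option.some.injEq] at hcc
          have := h2 _ a hdu
          omega
    rw [hr1, hr2] at hfix ⊢
    simp only [Option.isSome_none, Bool.or_false] at hfix ⊢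
    rw [e2, e1, hs2] at hfix ⊢
    obtain ⟨F1, F2⟩ := ih (s.1, false) h1 h2 (fun j hj => hl j (List.mem_cons_of_mem _ hj)) hfix
    refine ⟨F1, ?_⟩
    intro j hj
    rcases List.mem_cons.1 hj with rfl | hj'
    · exact ⟨hnl1, hnl2⟩
    · exact F2 j hj'

lemma bloop_post {n : Nat} {E : List (Int × Int × Int)} {A : List (Int × Int × Int)} {M : Int}
    (hE : EdgeOK n E)
    (hIdx : ∀ i ∈ PySem.List.pyRange 0 M 1, PySem.List.pyGetD A i (0, 0, 0) ∈ E)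
    (hSat : ∀ d : List (Option Int), d.length = n →
      (∀ i ∈ PySem.List.pyRange 0 M 1,
        infLt (infAdd (dGet d (PySem.List.pyGetD A i (0, 0, 0)).1)
            (PySem.List.pyGetD A i (0, 0, 0)).2.2)
          (dGet d (PySem.List.pyGetD A i (0, 0, 0)).2.1) = false ∧
        infLt (infAdd (dGet d (PySem.List.pyGetD A i (0, 0, 0)).2.1)
            (PySem.List.pyGetD A i (0, 0, 0)).2.2)
          (dGet d (PySem.List.pyGetD A i (0, 0, 0)).1) = false) → SatE E d) :
    ∀ (dist : List (Option Int)), dist.length = n → NonNeg dist →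
    (bloop A M dist).length = n ∧ NonNeg (bloop A M dist) ∧ dLe (bloop A M dist) dist ∧
    SatE E (bloop A M dist) ∧
    (∀ g, g.length = n → SatE E g → dLe g dist → dLe g (bloop A M dist)) := by
  intro dist
  fun_induction bloop A M dist with
  | case1 dist s hs ih =>
    intro h1 h2
    obtain ⟨B1, B2, B3, B4, B5⟩ :=
      bfold_post (A := A) hE (PySem.List.pyRange 0 M 1) (dist, false) h1 h2 hIdx
    obtain ⟨T1, T2, T3, T4, T5⟩ := ih B1 B2
    exact ⟨T1, T2, dLe_trans T3 B3, T4,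
      fun g hgl hgS hglow => T5 g hgl hgS (B4 g hgl hgS hglow)⟩
  | case2 dist s hs =>
    intro h1 h2
    have hsf : (bpass A M dist).2 = false := by simpa using hs
    obtain ⟨F1, F2⟩ :=
      bfold_fix (A := A) hE (PySem.List.pyRange 0 M 1) (dist, false) h1 h2 hIdx hsf
    have hSatd : SatE E dist := hSat dist h1 F2
    have hF1 : (bpass A M dist).1 = dist := F1
    rw [hF1]
    exact ⟨h1, h2, dLe_refl dist, hSatd, fun g _ _ hg => hg⟩

lemma gGet_replicate_self {γ : Type} (n : Nat) (x : γ) (i : Int) :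
    PySem.List.pyGetD (List.replicate n x) i x = x := by
  by_cases h : PySem.Raise.InRange (List.replicate n x).length i
  · rw [gGet_eq h]
    exact List.getElem_replicate ..
  · exact gGet_out h

-- ---- building the adjacency list represents the edge list ----

lemma foldRange_eq {σ : Type} {A : List (Int × Int × Int)} {M : Int}
    (hM : M ≤ (A.length : Int)) (F : σ → (Int × Int × Int) → σ) (init : σ) :
    (PySem.List.pyRange 0 M 1).foldl (fun s i => F s (PySem.List.pyGetD A i (0, 0, 0))) init =
      (A.take M.toNat).foldl F init := by
  by_cases hM0 : M ≤ 0
  · rw [PySem.List.pyRange_one_eq_nil hM0, show M.toNat = 0 by omega]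
    simp
  · have key : ∀ k : Nat, k ≤ A.length →
        (PySem.List.pyRange 0 (k : Int) 1).foldl
          (fun s i => F s (PySem.List.pyGetD A i (0, 0, 0))) init
          = (A.take k).foldl F init := by
      intro k
      induction k with
      | zero =>
        intro _
        rw [PySem.List.pyRange_one_eq_nil (by omega)]
        simp
      | succ k ihk =>
        intro hk
        have h1 : ((k : Nat) : Int) + 1 = (((k + 1 : Nat)) : Int) := by push_cast; ring
        rw [← h1, PySem.List.pyRange_one_succ_right (by positivity), List.foldl_append,
          ihk (by omega)]
        rw [List.take_add_one, List.getElem?_eq_getElem (show k < A.length by omega)]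
        simp only [List.foldl_cons, List.foldl_nil, Option.toList_some, List.foldl_append]
        congr 1
        rw [PySem.List.pyGetD_natCast]
        exact List.getD_eq_getElem A (0, 0, 0) (by omega)
    have hMt : M = ((M.toNat : Nat) : Int) := by omega
    rw [hMt, key M.toNat (by omega), Int.toNat_natCast]

lemma adjBuild_inv {n : Nat} :
    ∀ (E : List (Int × Int × Int)), EdgeOK n E →
    AdjInv n E (E.foldl adjAppend (List.replicate n [])) := by
  intro E
  induction E using List.reverseRecOn with
  | nil =>
    intro _
    refine ⟨by simp, ?_, ?_⟩
    · intro u p hp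
      exfalso
      rw [List.foldl_nil] at hp
      have h0 : PySem.List.pyGetD (List.replicate n ([] : List (Int × Int))) u [] = [] :=
        gGet_replicate_self ..
      simp only [PairIn] at hp
      rw [h0] at hp
      exact absurd hp (List.not_mem_nil)
    · intro e he
      exact absurd he (List.not_mem_nil)
  | append_singleton E' e ihE =>
    intro hok
    have hok' : EdgeOK n E' := fun e' he' => hok e' (List.mem_append_left _ he')
    obtain ⟨hlen, hfwd, hbwd⟩ := ihE hok'
    obtain ⟨he1, he2, _⟩ := hok e (List.mem_append_right _ (List.mem_singleton.2 rfl))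
    rw [List.foldl_append, List.foldl_cons, List.foldl_nil]
    rw [show adjAppend (E'.foldl adjAppend (List.replicate n [])) e =
      PySem.List.pySetD
        (PySem.List.pySetD (E'.foldl adjAppend (List.replicate n [])) e.1
          (PySem.List.pyGetD (E'.foldl adjAppend (List.replicate n [])) e.1 [] ++
            [(e.2.1, e.2.2)]))
        e.2.1
        (PySem.List.pyGetD
          (PySem.List.pySetD (E'.foldl adjAppend (List.replicate n [])) e.1
            (PySem.List.pyGetD (E'.foldl adjAppend (List.replicate n [])) e.1 [] ++
              [(e.2.1, e.2.2)]))
          e.2.1 [] ++ [(e.1, e.2.2)]) from rfl]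
    set adjP := E'.foldl adjAppend (List.replicate n ([] : List (Int × Int))) with hadjP
    set s1 := PySem.List.pyGetD adjP e.1 ([] : List (Int × Int)) ++ [(e.2.1, e.2.2)] with hs1
    set adj1 := PySem.List.pySetD adjP e.1 s1 with hadj1
    have hL1 : adj1.length = n := by rw [hadj1, gSet_length, hlen]
    have hslot1 : ∀ u : Int, PySem.List.pyGetD adj1 u ([] : List (Int × Int)) =
        if alias2 n u e.1 then s1 else PySem.List.pyGetD adjP u [] := by
      intro u
      rw [hadj1, gGet_gSet (by rw [hlen]; exact he1) u, hlen]
    set s2 := PySem.List.pyGetD adj1 e.2.1 ([] : List (Int × Int)) ++ [(e.1, e.2.2)] with hs2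
    set adj2 := PySem.List.pySetD adj1 e.2.1 s2 with hadj2
    have hL2 : adj2.length = n := by rw [hadj2, gSet_length, hL1]
    have hslot2 : ∀ u : Int, PySem.List.pyGetD adj2 u ([] : List (Int × Int)) =
        if alias2 n u e.2.1 then s2 else PySem.List.pyGetD adj1 u [] := by
      intro u
      rw [hadj2, gGet_gSet (by rw [hL1]; exact he2) u, hL1]
    have hmono : ∀ (u : Int) (p : Int × Int), PairIn adjP u p → PairIn adj2 u p := by
      intro u p hp
      have hu : PySem.Raise.InRange n u := by
        by_contra hu
        simp only [PairIn] at hp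
        rw [gGet_out (by rw [hlen]; exact hu)] at hp
        exact absurd hp (List.not_mem_nil)
      show p ∈ PySem.List.pyGetD adj2 u []
      rw [hslot2 u]
      split_ifs with ha2
      · rw [hs2, hslot1 e.2.1]
        split_ifs with ha1
        · rw [hs1]
          have : PySem.List.pyGetD adjP u ([] : List (Int × Int)) =
              PySem.List.pyGetD adjP e.1 [] :=
            gGet_alias (by rw [hlen]; exact alias2_trans ha2 ha1)
          rw [← this]
          exact List.mem_append_left _ (List.mem_append_left _ hp)
        · have : PySem.List.pyGetD adjP u ([] : List (Int × Int)) =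
              PySem.List.pyGetD adjP e.2.1 [] := gGet_alias (by rw [hlen]; exact ha2)
          rw [← this]
          exact List.mem_append_left _ hp
      · rw [hslot1 u]
        split_ifs with ha1
        · rw [hs1]
          have : PySem.List.pyGetD adjP u ([] : List (Int × Int)) =
              PySem.List.pyGetD adjP e.1 [] := gGet_alias (by rw [hlen]; exact ha1)
          rw [← this]
          exact List.mem_append_left _ hp
        · exact hp
    refine ⟨hL2, ?_, ?_⟩
    · -- forward: every recorded pair comes from an edge
      intro u p hp
      simp only [PairIn] at hp
      rw [hslot2 u] at hp
      by_cases ha2 : alias2 n u e.2.1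
      · rw [if_pos ha2, hs2] at hp
        rcases List.mem_append.1 hp with hp | hp
        · rw [hslot1 e.2.1] at hp
          by_cases ha1 : alias2 n e.2.1 e.1
          · rw [if_pos ha1, hs1] at hp
            rcases List.mem_append.1 hp with hp | hp
            · obtain ⟨e', he', hw', hcase⟩ := hfwd e.1 p hp
              refine ⟨e', List.mem_append_left _ he', hw', ?_⟩
              rcases hcase with ⟨hal, hv⟩ | ⟨hal, hv⟩
              · exact Or.inl ⟨alias2_trans (alias2_trans ha2 ha1) hal, hv⟩
              · exact Or.inr ⟨alias2_trans (alias2_trans ha2 ha1) hal, hv⟩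
            · rw [List.mem_singleton] at hp
              subst hp
              exact ⟨e, List.mem_append_right _ (List.mem_singleton.2 rfl), rfl,
                Or.inl ⟨alias2_trans ha2 ha1, rfl⟩⟩
          · rw [if_neg ha1] at hp
            obtain ⟨e', he', hw', hcase⟩ := hfwd e.2.1 p hp
            refine ⟨e', List.mem_append_left _ he', hw', ?_⟩
            rcases hcase with ⟨hal, hv⟩ | ⟨hal, hv⟩
            · exact Or.inl ⟨alias2_trans ha2 hal, hv⟩
            · exact Or.inr ⟨alias2_trans ha2 hal, hv⟩
        · rw [List.mem_singleton] at hp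
          subst hp
          exact ⟨e, List.mem_append_right _ (List.mem_singleton.2 rfl), rfl,
            Or.inr ⟨ha2, rfl⟩⟩
      · rw [if_neg ha2, hslot1 u] at hp
        by_cases ha1 : alias2 n u e.1
        · rw [if_pos ha1, hs1] at hp
          rcases List.mem_append.1 hp with hp | hp
          · obtain ⟨e', he', hw', hcase⟩ := hfwd e.1 p hp
            refine ⟨e', List.mem_append_left _ he', hw', ?_⟩
            rcases hcase with ⟨hal, hv⟩ | ⟨hal, hv⟩
            · exact Or.inl ⟨alias2_trans ha1 hal, hv⟩
            · exact Or.inr ⟨alias2_trans ha1 hal, hv⟩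
          · rw [List.mem_singleton] at hp
            subst hp
            exact ⟨e, List.mem_append_right _ (List.mem_singleton.2 rfl), rfl,
              Or.inl ⟨ha1, rfl⟩⟩
        · rw [if_neg ha1] at hp
          obtain ⟨e', he', hw', hcase⟩ := hfwd u p hp
          exact ⟨e', List.mem_append_left _ he', hw', hcase⟩
    · -- backward: every edge is recorded, both directions
      intro e' he'
      rcases List.mem_append.1 he' with he' | he'
      · obtain ⟨hb1, hb2⟩ := hbwd e' he'
        exact ⟨hmono _ _ hb1, hmono _ _ hb2⟩
      · rw [List.mem_singleton] at he'
        subst he'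
        constructor
        · show (e'.2.1, e'.2.2) ∈ PySem.List.pyGetD adj2 e'.1 []
          rw [hslot2 e'.1]
          split_ifs with ha
          · rw [hs2, hslot1 e'.2.1, if_pos (alias2_symm ha), hs1]
            exact List.mem_append_left _
              (List.mem_append_right _ (List.mem_singleton.2 rfl))
          · rw [hslot1 e'.1, if_pos (alias2_refl he1), hs1]
            exact List.mem_append_right _ (List.mem_singleton.2 rfl)
        · show (e'.1, e'.2.2) ∈ PySem.List.pyGetD adj2 e'.2.1 []
          rw [hslot2 e'.2.1, if_pos (alias2_refl he2), hs2]
          exact List.mem_append_right _ (List.mem_singleton.2 rfl)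

lemma exercise_main (N : Int) (M : Int) (A : List (Int × Int × Int)) (src : Int) (dest : Int)
    (X : Int) (hpre : Pre_exercise N M A src dest X) :
    exercise N M A src dest X = exercise_alt N M A src dest X := by
  obtain ⟨hM, hsrc, hdest, hedges⟩ := hpre
  set n := N.toNat with hn
  set E := A.take M.toNat with hEdef
  have hE : EdgeOK n E := fun e he => hedges e he
  -- the built adjacency structure
  have hadjEq : (PySem.List.pyRange 0 M 1).foldl
      (fun adj i => adjAppend adj (PySem.List.pyGetD A i (0, 0, 0)))
      (List.replicate n ([] : List (Int × Int))) = E.foldl adjAppend (List.replicate n []) :=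
    foldRange_eq hM adjAppend _
  have hadj : AdjInv n E ((PySem.List.pyRange 0 M 1).foldl
      (fun adj i => adjAppend adj (PySem.List.pyGetD A i (0, 0, 0)))
      (List.replicate n ([] : List (Int × Int)))) := by
    rw [hadjEq]
    exact adjBuild_inv E hE
  -- the shared initial distance table
  set d0 := dSet (List.replicate n (none : Option Int)) src (some 0) with hd0
  have hlen0 : d0.length = n := by rw [hd0, dSet_length, List.length_replicate]
  have hsrc' : PySem.Raise.InRange (List.replicate n (none : Option Int)).length src := by
    rw [List.length_replicate]; exact hsrc
  have hget0 : ∀ i : Int, dGet d0 i = if alias2 n i src then some 0 else none := by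
    intro i
    rw [hd0, dGet_dSet hsrc' i, List.length_replicate, dGet_replicate]
  have hnn0 : NonNeg d0 := by
    intro i a ha
    rw [hget0 i] at ha
    split_ifs at ha with hal
    · cases ha; omega
  have hheap : HeapInv n d0 [(0, src)] := by
    intro p hp
    rw [List.mem_singleton] at hp
    subst hp
    refine ⟨hsrc, ?_⟩
    rw [hget0 src, if_pos (alias2_refl hsrc)]
    exact iLe_refl _
  have hI1 : I1 n ((PySem.List.pyRange 0 M 1).foldl
      (fun adj i => adjAppend adj (PySem.List.pyGetD A i (0, 0, 0)))
      (List.replicate n ([] : List (Int × Int)))) [(0, src)] d0 := by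
    intro u p _
    rcases hdu : dGet d0 u with _ | a
    · left
      rfl
    · right
      rw [hget0 u] at hdu
      split_ifs at hdu with hal
      · refine ⟨0, src, List.mem_singleton.2 rfl, hal, ?_⟩
        rw [hget0 src, if_pos (alias2_refl hsrc)]
  obtain ⟨A1, A2, A3, A4, A5⟩ := dloop_post hadj hE [(0, src)] d0 hlen0 hnn0 hheap hI1
  -- B side
  have hIdx : ∀ i ∈ PySem.List.pyRange 0 M 1, PySem.List.pyGetD A i (0, 0, 0) ∈ E := by
    intro i hi
    rw [PySem.List.mem_pyRange_one] at hi
    have hiA : i < (A.length : Int) := lt_of_lt_of_le hi.2 hM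
    rw [PySem.List.pyGetD_eq_getElem A (0, 0, 0) hi.1 hiA]
    have hlt : i.toNat < (A.take M.toNat).length := by
      rw [List.length_take]
      omega
    have hgt : (A.take M.toNat)[i.toNat]'hlt = A[i.toNat]'(by omega) := List.getElem_take ..
    rw [hEdef, ← hgt]
    exact List.getElem_mem hlt
  have hSat : ∀ d : List (Option Int), d.length = n →
      (∀ i ∈ PySem.List.pyRange 0 M 1,
        infLt (infAdd (dGet d (PySem.List.pyGetD A i (0, 0, 0)).1)
            (PySem.List.pyGetD A i (0, 0, 0)).2.2)
          (dGet d (PySem.List.pyGetD A i (0, 0, 0)).2.1) = false ∧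
        infLt (infAdd (dGet d (PySem.List.pyGetD A i (0, 0, 0)).2.1)
            (PySem.List.pyGetD A i (0, 0, 0)).2.2)
          (dGet d (PySem.List.pyGetD A i (0, 0, 0)).1) = false) → SatE E d := by
    intro d _ hsats e he
    rw [hEdef] at he
    obtain ⟨j, hj, hje⟩ := List.getElem_of_mem he
    have hjA : j < A.length := by
      have := hj
      rw [List.length_take] at this
      omega
    have hjM : (j : Int) < M := by
      have := hj
      rw [List.length_take] at this
      omega
    have hmem : (j : Int) ∈ PySem.List.pyRange 0 M 1 :=
      PySem.List.mem_pyRange_one.2 ⟨by positivity, hjM⟩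
    have hgetj : PySem.List.pyGetD A ((j : Nat) : Int) (0, 0, 0) = e := by
      rw [PySem.List.pyGetD_eq_getElem A (0, 0, 0) (by positivity) (by exact_mod_cast hjA)]
      rw [← hje, List.getElem_take]
      congr 1
    have := hsats (j : Int) hmem
    rw [hgetj] at this
    exact this
  obtain ⟨B1, B2, B3, B4, B5⟩ := bloop_post hE hIdx hSat d0 hlen0 hnn0
  have hAB : dLe (dloop ((PySem.List.pyRange 0 M 1).foldl
      (fun adj i => adjAppend adj (PySem.List.pyGetD A i (0, 0, 0)))
      (List.replicate n ([] : List (Int × Int)))) [(0, src)] d0) (bloop A M d0) :=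
    B5 _ A1 A4 A3
  have hBA : dLe (bloop A M d0) (dloop ((PySem.List.pyRange 0 M 1).foldl
      (fun adj i => adjAppend adj (PySem.List.pyGetD A i (0, 0, 0)))
      (List.replicate n ([] : List (Int × Int)))) [(0, src)] d0) :=
    A5 _ B1 B4 B3
  have hkey : dGet (dloop ((PySem.List.pyRange 0 M 1).foldl
      (fun adj i => adjAppend adj (PySem.List.pyGetD A i (0, 0, 0)))
      (List.replicate n ([] : List (Int × Int)))) [(0, src)] d0) dest =
      dGet (bloop A M d0) dest :=
    iLe_antisymm (hAB dest) (hBA dest)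
  show (if infLt (some X) (dGet (dloop ((PySem.List.pyRange 0 M 1).foldl
      (fun adj i => adjAppend adj (PySem.List.pyGetD A i (0, 0, 0)))
      (List.replicate n ([] : List (Int × Int)))) [(0, src)] d0) dest) = true
    then "Neeman's Wool Joggers" else "Neeman's Cotton Classics") =
    (if infLt (some X) (dGet (bloop A M d0) dest) = true
    then "Neeman's Wool Joggers" else "Neeman's Cotton Classics")
  rw [hkey]

-- ===== VERDICT (by name: the statement is the Claim_ definition above) =====
theorem exercise_spec : Claim_equal_exercise := by
  intro N M A src dest X _ hpre
  exact exercise_main N M A src dest X hpre
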